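-- pv_equiv track=rewrite | github.com/JuanDZM2105/problema-de-asignacion--heuristico | metodo_constructivo.py | residual_capacity_by_day
-- ===== SOURCE A (Python) =====
-- from typing import Dict, List, Tuple
--
-- def group_size(employees_g: Dict[str, List[str]], g: str) -> int:
--     return len(employees_g.get(g, []))
--
-- def total_desks(desks_z: Dict[str, List[str]]) -> int:
--     return sum(len(ds) for ds in desks_z.values())
--
-- def residual_capacity_by_day(days: List[str],
--                              groups_days: Dict[str, str],
--                              employees_g: Dict[str, List[str]],
--                              desks_z: Dict[str, List[str]]) -> Dict[str, int]:
--     cap_total = total_desks(desks_z)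
--     return {
--         d: cap_total - sum(group_size(employees_g, g) for g, dd in groups_days.items() if dd == d)
--         for d in days
--     }
-- ===== SOURCE B (Python) =====
-- def residual_capacity_by_day(days, groups_days, employees_g, desks_z):
--     cap_total = sum(len(ds) for ds in desks_z.values())
--     used = {}
--     for g, d in groups_days.items():
--         used[d] = used.get(d, 0) + len(employees_g.get(g, []))
--     return {d: cap_total - used.get(d, 0) for d in days}
-- ===== Notes on version B (the rewrite author's own statement) =====
-- stated objective: faster
-- what changed: Instead of re-scanning all groups for every day, B makes one pass over groups_days aggregating group sizes into a per-day dict and then subtracts each day's total from the desk capacity.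
import Mathlib
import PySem

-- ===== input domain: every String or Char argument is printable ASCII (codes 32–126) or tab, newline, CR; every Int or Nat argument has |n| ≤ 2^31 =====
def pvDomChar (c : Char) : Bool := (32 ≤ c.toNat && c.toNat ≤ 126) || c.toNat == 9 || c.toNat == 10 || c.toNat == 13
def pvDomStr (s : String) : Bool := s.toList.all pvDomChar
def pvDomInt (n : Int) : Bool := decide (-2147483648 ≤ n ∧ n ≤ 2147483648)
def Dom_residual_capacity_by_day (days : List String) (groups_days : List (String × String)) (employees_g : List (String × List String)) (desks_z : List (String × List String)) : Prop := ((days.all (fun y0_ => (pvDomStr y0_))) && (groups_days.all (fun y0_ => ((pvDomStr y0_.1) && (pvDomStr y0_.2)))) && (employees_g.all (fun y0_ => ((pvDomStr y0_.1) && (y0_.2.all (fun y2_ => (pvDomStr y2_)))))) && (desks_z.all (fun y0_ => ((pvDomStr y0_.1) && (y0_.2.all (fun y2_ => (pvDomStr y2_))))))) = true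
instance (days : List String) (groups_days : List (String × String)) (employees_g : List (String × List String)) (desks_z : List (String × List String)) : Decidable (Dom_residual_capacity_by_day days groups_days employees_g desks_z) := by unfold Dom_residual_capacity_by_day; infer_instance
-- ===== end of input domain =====

-- B aggregates group sizes per day in one pass instead of rescanning all groups for every day (asymptotically faster).


-- ===== PORT A =====
-- group_size(employees_g, g) = len(employees_g.get(g, []))
def pvGroupSize (emp : PySem.Dict String (List String)) (g : String) : Int :=
  ((emp.getD g []).length : Int)

-- total_desks(desks_z) = sum(len(ds) for ds in desks_z.values())
def pvTotalDesks (desks_z : PySem.Dict String (List String)) : Int :=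
  desks_z.values.foldl (fun acc ds => acc + (ds.length : Int)) 0

-- A: dict comprehension over days; per day an inner sum over all of groups_days.items()
def residual_capacity_by_day (days : List String) (groups_days : List (String × String)) (employees_g : List (String × List String)) (desks_z : List (String × List String)) : List (String × Int) :=
  let gd := PySem.Dict.ofList groups_days
  let emp := PySem.Dict.ofList employees_g
  let cap_total := pvTotalDesks (PySem.Dict.ofList desks_z)
  (days.foldl (fun d day =>
      d.insert day (cap_total -
        gd.items.foldl (fun acc p => if p.2 == day then acc + pvGroupSize emp p.1 else acc) 0))
    PySem.Dict.empty).items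

-- ===== PORT B =====
-- B: one pass over groups_days aggregating sizes per day, then one pass over days
def residual_capacity_by_day_alt (days : List String) (groups_days : List (String × String)) (employees_g : List (String × List String)) (desks_z : List (String × List String)) : List (String × Int) :=
  let emp := PySem.Dict.ofList employees_g
  let cap_total := (PySem.Dict.ofList desks_z).values.foldl (fun acc ds => acc + (ds.length : Int)) 0
  let used := (PySem.Dict.ofList groups_days).items.foldl
      (fun u p => u.insert p.2 (u.getD p.2 0 + ((emp.getD p.1 []).length : Int))) PySem.Dict.empty
  (days.foldl (fun d day => d.insert day (cap_total - used.getD day 0)) PySem.Dict.empty).items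

-- ===== PRECONDITION & SPEC =====
def Spec_residual_capacity_by_day (days : List String) (groups_days : List (String × String)) (employees_g : List (String × List String)) (desks_z : List (String × List String)) (out : List (String × Int)) : Prop := out = residual_capacity_by_day_alt days groups_days employees_g desks_z
instance (days : List String) (groups_days : List (String × String)) (employees_g : List (String × List String)) (desks_z : List (String × List String)) (out : List (String × Int)) : Decidable (Spec_residual_capacity_by_day days groups_days employees_g desks_z out) := by unfold Spec_residual_capacity_by_day; infer_instance

-- ===== CLAIM (what is proved, stated in full; the proofs are below) =====
def Claim_equal_residual_capacity_by_day : Prop := ∀ (days : List String) (groups_days : List (String × String)) (employees_g : List (String × List String)) (desks_z : List (String × List String)), Dom_residual_capacity_by_day days groups_days employees_g desks_z → Spec_residual_capacity_by_day days groups_days employees_g desks_z (residual_capacity_by_day days groups_days employees_g desks_z)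

-- ===== LEMMAS AND PROOFS =====
-- aggregation invariant: after the one-pass fold, the per-day total equals A's filtered sum
theorem pv_getD_agg (sz : String → Int) (day : String) :
    ∀ (l : List (String × String)) (u : PySem.Dict String Int),
      (l.foldl (fun u p => u.insert p.2 (u.getD p.2 0 + sz p.1)) u).getD day 0
        = l.foldl (fun acc p => if p.2 == day then acc + sz p.1 else acc) (u.getD day 0) := by
  intro l
  induction l with
  | nil => intro u; rfl
  | cons p l ih =>
    intro u
    simp only [List.foldl_cons, ih]
    rw [PySem.Dict.getD_insert]
    by_cases h : day = p.2
    · simp [h]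
    · simp [h, Ne.symm h]

-- ===== VERDICT (by name: the statement is the Claim_ definition above) =====
theorem residual_capacity_by_day_spec : Claim_equal_residual_capacity_by_day := by
  intro days groups_days employees_g desks_z _
  unfold Spec_residual_capacity_by_day residual_capacity_by_day residual_capacity_by_day_alt
  simp only [pvTotalDesks]
  congr 1
  congr 1
  funext d day
  congr 1
  rw [pv_getD_agg (fun g => (((PySem.Dict.ofList employees_g).getD g []).length : Int)) day]
  simp [pvGroupSize, PySem.Dict.getD_empty]
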